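-- pv_equiv track=rewrite | github.com/mannirulz/DeepDAD | Src/Anomaly.py | codetoanomaly
-- ===== SOURCE A (Python) =====
-- def codetoanomaly(int_type):
--     result = ""
--     for i in range(0, 16, 1):
--         mask = 1 << i
--         if (mask & int_type) != 0:
--             if result == "":
--                 result = "A" + str(i)
--             else:
--                 result += ",A" + str(i)
--
--     if result == "":
--         return "-"
--     else:
--         return result
-- ===== SOURCE B (Python) =====
-- def codetoanomaly(int_type):
--     n = int_type & 0xFFFF
--     labels = []
--     while n:
--         low = n & -n
--         labels.append("A" + str(low.bit_length() - 1))
--         n &= n - 1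
--     return ",".join(labels) if labels else "-"
-- ===== Notes on version B (the rewrite author's own statement) =====
-- stated objective: alternative
-- what changed: Instead of scanning every one of the sixteen bit positions and growing the result string with an emptiness branch, B masks the input to its low sixteen bits and iterates only over the SET bits via the lowest-set-bit trick (isolate the lowest set bit, label its index via bit_length, clear it), collecting the labels in a list joined with a comma at the end.
import Mathlib
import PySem

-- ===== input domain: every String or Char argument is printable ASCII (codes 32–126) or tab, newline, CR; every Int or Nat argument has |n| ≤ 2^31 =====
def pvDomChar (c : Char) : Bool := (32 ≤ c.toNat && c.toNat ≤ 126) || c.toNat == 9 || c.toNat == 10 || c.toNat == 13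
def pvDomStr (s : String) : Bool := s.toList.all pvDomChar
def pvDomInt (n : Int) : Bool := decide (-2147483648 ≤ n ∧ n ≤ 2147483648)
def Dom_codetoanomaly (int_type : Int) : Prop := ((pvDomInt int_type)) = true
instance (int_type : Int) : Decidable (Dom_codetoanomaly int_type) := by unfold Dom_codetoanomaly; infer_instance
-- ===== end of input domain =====

-- B iterates only over the SET bits of int_type & 0xFFFF via the lowest-set-bit trick and joins
-- collected labels, instead of A's scan of all 16 positions with string accumulation (objective: alternative).

-- ===== PORT A =====
def codetoanomaly (int_type : Int) : String :=
  let result := (PySem.List.pyRange 0 16 1).foldl (fun result i =>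
    -- mask = 1 << i ; i runs over 0..15 so i.toNat is exact
    let mask : Int := 1 <<< i.toNat
    if PySem.Int.band mask int_type ≠ 0 then
      if result = "" then "A" ++ PySem.Int.toStr i
      else result ++ ",A" ++ PySem.Int.toStr i
    else result) ""
  if result = "" then "-" else result

-- ===== PORT B =====
-- the while loop runs with fuel 16: n = int_type & 0xFFFF has at most 16 set bits and
-- each iteration clears one, so the fuel is never exhausted before n = 0
def codetoanomalyAltLoop : Nat → Int → List String → List String
  | 0, _, labels => labels
  | fuel + 1, n, labels =>
    if n = 0 then labels
    else
      let low := PySem.Int.band n (-n)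
      codetoanomalyAltLoop fuel (PySem.Int.band n (n - 1))
        (labels ++ ["A" ++ PySem.Int.toStr ((PySem.Int.bitLength low : Int) - 1)])

def codetoanomaly_alt (int_type : Int) : String :=
  let n := PySem.Int.band int_type 65535
  let labels := codetoanomalyAltLoop 16 n []
  if labels = [] then "-" else PySem.Str.join "," labels

-- ===== PRECONDITION & SPEC =====
def Spec_codetoanomaly (int_type : Int) (out : String) : Prop := out = codetoanomaly_alt int_type
instance (int_type : Int) (out : String) : Decidable (Spec_codetoanomaly int_type out) := by unfold Spec_codetoanomaly; infer_instance

-- ===== CLAIM (what is proved, stated in full; the proofs are below) =====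
def Claim_equal_codetoanomaly : Prop := ∀ (int_type : Int), Dom_codetoanomaly int_type → Spec_codetoanomaly int_type (codetoanomaly int_type)

-- ===== LEMMAS AND PROOFS =====

-- the label for bit j
def natLab (j : Nat) : String := "A" ++ PySem.Int.toStr (j : Int)

-- ascending list of set-bit indices of m below width w
def sb : Nat → Nat → List Nat
  | 0, _ => []
  | w + 1, m => (if m % 2 = 1 then [0] else []) ++ (sb w (m / 2)).map (· + 1)

-- "," ++ x₁ ++ "," ++ x₂ ++ … (the tail of a comma join)
def joinPre : List String → String
  | [] => ""
  | y :: ys => "," ++ y ++ joinPre ys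

lemma sb_zero (w : Nat) : sb w 0 = [] := by
  induction w with
  | zero => rfl
  | succ w ih => simp [sb, ih]

lemma sb_length (w m : Nat) : (sb w m).length ≤ w := by
  induction w generalizing m with
  | zero => simp [sb]
  | succ w ih =>
    simp only [sb, List.length_append, List.length_map]
    have h := ih (m / 2)
    split <;> simp only [List.length_cons, List.length_nil] <;> omega

lemma sb_filter (w m : Nat) : sb w m = (List.range w).filter (m.testBit ·) := by
  induction w generalizing m with
  | zero => rfl
  | succ w ih =>
    have hcomp : List.filter (fun x => m.testBit x) (List.map Nat.succ (List.range w))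
        = List.map Nat.succ (List.filter (fun x => (m / 2).testBit x) (List.range w)) := by
      rw [List.filter_map]
      congr 1
      exact List.filter_congr (fun x _ => by simp [Function.comp, Nat.testBit_add_one])
    have hsucc : List.map Nat.succ (sb w (m / 2)) = List.map (· + 1) (sb w (m / 2)) := rfl
    rw [List.range_succ_eq_map, List.filter_cons, hcomp, ← ih (m / 2), hsucc]
    simp only [sb, Nat.testBit_zero]
    by_cases h2 : m % 2 = 1 <;> simp [h2]

lemma and_pred_odd (m : Nat) (h : m % 2 = 1) : m &&& (m - 1) = m - 1 := by
  apply Nat.eq_of_testBit_eq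
  intro i
  cases i with
  | zero =>
    simp [Nat.testBit_zero]
    omega
  | succ i =>
    have h2 : (m - 1) / 2 = m / 2 := by omega
    rw [Nat.testBit_and, Nat.testBit_add_one, Nat.testBit_add_one, h2, Bool.and_self]

lemma and_pred_even (m : Nat) (h : m % 2 = 0) (hm : 0 < m) :
    m &&& (m - 1) = 2 * ((m / 2) &&& (m / 2 - 1)) := by
  apply Nat.eq_of_testBit_eq
  intro i
  cases i with
  | zero =>
    simp [Nat.testBit_zero]
    omega
  | succ i =>
    have h2 : (m - 1) / 2 = m / 2 - 1 := by omega
    have h3 : (2 * (m / 2 &&& (m / 2 - 1))) / 2 = m / 2 &&& (m / 2 - 1) := by omega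
    rw [Nat.testBit_and, Nat.testBit_add_one, Nat.testBit_add_one, h2,
      Nat.testBit_add_one, h3, Nat.testBit_and]

lemma bitLength_pos (x : Nat) (hx : 0 < x) : 0 < PySem.Int.bitLength (x : Int) := by
  rw [PySem.Int.bitLength_natCast hx]; omega

-- the crux: for m > 0 the set-bit list starts with the lowest set bit
-- (whose index is bit_length(m - (m &&& (m-1))) - 1) followed by the set bits of m &&& (m-1)
lemma sb_cons (w : Nat) : ∀ m : Nat, 0 < m → m < 2 ^ w →
    sb w m = (PySem.Int.bitLength ((m - (m &&& (m - 1)) : Nat) : Int) - 1) :: sb w (m &&& (m - 1)) := by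
  induction w with
  | zero => intro m hm hlt; simp at hlt; omega
  | succ w ih =>
    intro m hm hlt
    rcases Nat.even_or_odd m with he | ho
    · -- m even, m > 0
      have h2 : m % 2 = 0 := Nat.even_iff.mp he
      have hm2 : 0 < m / 2 := by omega
      have hlt2 : m / 2 < 2 ^ w := by
        have : (2:Nat) ^ (w + 1) = 2 * 2 ^ w := by ring
        omega
      have hc := and_pred_even m h2 hm
      have hcle : m / 2 &&& (m / 2 - 1) ≤ m / 2 - 1 := Nat.and_le_right
      have hdpos : 0 < m / 2 - (m / 2 &&& (m / 2 - 1)) := by omega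
      have hsub : m - (m &&& (m - 1)) = 2 * (m / 2 - (m / 2 &&& (m / 2 - 1))) := by omega
      have hbl : PySem.Int.bitLength ((m - (m &&& (m - 1)) : Nat) : Int)
          = PySem.Int.bitLength ((m / 2 - (m / 2 &&& (m / 2 - 1)) : Nat) : Int) + 1 := by
        rw [hsub, PySem.Int.bitLength_natCast (by omega)]
        congr 2
        omega
      have hbl' := bitLength_pos _ hdpos
      have heven_c : (m &&& (m - 1)) % 2 = 0 := by omega
      have hdiv_c : (m &&& (m - 1)) / 2 = m / 2 &&& (m / 2 - 1) := by omega
      rw [show sb (w + 1) m = (sb w (m / 2)).map (· + 1) by simp [sb, h2]]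
      rw [show sb (w + 1) (m &&& (m - 1)) = (sb w ((m &&& (m - 1)) / 2)).map (· + 1) by
        simp [sb, heven_c]]
      rw [ih (m / 2) hm2 hlt2, hdiv_c, hbl]
      simp only [List.map_cons]
      congr 1
      omega
    · -- m odd
      have h2 : m % 2 = 1 := Nat.odd_iff.mp ho
      have hc := and_pred_odd m h2
      have hdiv : (m - 1) / 2 = m / 2 := by omega
      have hsub : m - (m &&& (m - 1)) = 1 := by omega
      rw [hsub]
      have hbl : PySem.Int.bitLength ((1 : Nat) : Int) = 1 := by decide
      rw [show ((1:Nat) : Int) = (1 : Int) by norm_num] at hbl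
      rw [show (((1:Nat)) : Int) = (1 : Int) by norm_num, hbl]
      rw [show sb (w + 1) m = [0] ++ (sb w (m / 2)).map (· + 1) by simp [sb, h2]]
      rw [hc]
      rw [show sb (w + 1) (m - 1) = (sb w ((m - 1) / 2)).map (· + 1) by
        simp [sb, show (m - 1) % 2 = 0 by omega]]
      rw [hdiv]
      rfl

-- n & -n on a positive natural, in PySem's two's-complement semantics
lemma band_neg_self (m : Nat) (hm : 0 < m) :
    PySem.Int.band (m : Int) (-(m : Int)) = ((m - (m &&& (m - 1)) : Nat) : Int) := by
  have h1 : ¬ (0 ≤ -(m : Int)) := by omega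
  have h2 : (0 : Int) ≤ (m : Int) := by positivity
  unfold PySem.Int.band
  rw [if_pos h2, if_neg h1]
  have h3 : (-(-(m:Int)) - 1).toNat = m - 1 := by omega
  have h4 : ((m:Int)).toNat = m := Int.toNat_natCast m
  rw [h3, h4]

-- n & (n-1) on a positive natural
lemma band_pred (m : Nat) (hm : 0 < m) :
    PySem.Int.band (m : Int) ((m : Int) - 1) = ((m &&& (m - 1) : Nat) : Int) := by
  rw [show ((m : Int) - 1) = ((m - 1 : Nat) : Int) by omega]
  exact PySem.Int.band_natCast m (m - 1)

-- the masked value is nonnegative and below 2^16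
lemma band_mask_nonneg (b : Int) : 0 ≤ PySem.Int.band b 65535 := by
  rw [PySem.Int.band_comm]
  exact PySem.Int.band_nonneg_of_nonneg_left b (by norm_num)

lemma band_mask_lt (b : Int) : (PySem.Int.band b 65535).toNat < 65536 := by
  unfold PySem.Int.band
  split_ifs with h1 h2 h3
  · have : b.toNat &&& (65535:Int).toNat ≤ (65535:Int).toNat := Nat.and_le_right
    simp only [Int.toNat_natCast]
    omega
  · simp only [Int.toNat_natCast]; omega
  · simp only [Int.toNat_natCast]; omega
  · omega

-- per-bit bridge: A's mask test on int_type equals a bit test on the masked value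
lemma band_two_pow_ne_zero_iff (b : Int) (j : Nat) (hj : j < 16) :
    (PySem.Int.band (((1 <<< j : Nat) : Int)) b ≠ 0) ↔
      (PySem.Int.band b 65535).toNat.testBit j = true := by
  have hmask : (((1 <<< j : Nat) : Int)) = ((2 ^ j : Nat) : Int) := by
    rw [Nat.one_shiftLeft]
  rw [hmask]
  by_cases hb : 0 ≤ b
  · -- b ≥ 0
    have hA : PySem.Int.band ((2 ^ j : Nat) : Int) b = ((2 ^ j &&& b.toNat : Nat) : Int) := by
      unfold PySem.Int.band
      rw [if_pos (by positivity), if_pos hb, Int.toNat_natCast]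
    have hB : PySem.Int.band b 65535 = ((b.toNat &&& 65535 : Nat) : Int) := by
      unfold PySem.Int.band
      rw [if_pos hb, if_pos (by norm_num)]
      rfl
    rw [hA, hB, Int.toNat_natCast]
    rw [show (65535 : Nat) = 2 ^ 16 - 1 by norm_num, Nat.and_two_pow_sub_one_eq_mod,
      Nat.testBit_mod_two_pow]
    rw [Nat.two_pow_and]
    simp only [hj, decide_true, Bool.true_and]
    cases hbit : b.toNat.testBit j <;> simp
  · -- b < 0 : two's complement branch, k = (-b-1).toNat
    set k := (-b - 1).toNat with hk
    have hA : PySem.Int.band ((2 ^ j : Nat) : Int) b = ((2 ^ j - (2 ^ j &&& k) : Nat) : Int) := by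
      unfold PySem.Int.band
      rw [if_pos (by positivity), if_neg hb, Int.toNat_natCast]
    have hB : PySem.Int.band b 65535 = ((65535 - (65535 &&& k) : Nat) : Int) := by
      unfold PySem.Int.band
      rw [if_neg hb, if_pos (by norm_num)]
      rfl
    rw [hA, hB, Int.toNat_natCast]
    have hmod : (65535 : Nat) &&& k = k % 2 ^ 16 := by
      rw [Nat.and_comm, show (65535 : Nat) = 2 ^ 16 - 1 by norm_num,
        Nat.and_two_pow_sub_one_eq_mod]
    have hklt : k % 2 ^ 16 < 2 ^ 16 := Nat.mod_lt _ (by norm_num)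
    have hsub : (65535 : Nat) - (65535 &&& k) = 2 ^ 16 - (k % 2 ^ 16 + 1) := by
      rw [hmod]; omega
    rw [hsub, Nat.testBit_two_pow_sub_succ hklt, Nat.testBit_mod_two_pow]
    simp only [hj, decide_true, Bool.true_and]
    rw [Nat.two_pow_and]
    cases hbit : k.testBit j <;> simp

-- B's loop produces exactly the labels of the ascending set-bit list
lemma altLoop_eq : ∀ (f : Nat) (m : Nat) (acc : List String), m < 2 ^ 16 →
    (sb 16 m).length ≤ f →
    codetoanomalyAltLoop f (m : Int) acc = acc ++ (sb 16 m).map natLab := by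
  intro f
  induction f with
  | zero =>
    intro m acc hlt hlen
    have : sb 16 m = [] := List.length_eq_zero_iff.mp (by omega)
    simp [codetoanomalyAltLoop, this]
  | succ f ih =>
    intro m acc hlt hlen
    by_cases hm : m = 0
    · subst hm
      simp [codetoanomalyAltLoop, sb_zero]
    · have hm' : 0 < m := Nat.pos_of_ne_zero hm
      have hcons := sb_cons 16 m hm' hlt
      rw [show codetoanomalyAltLoop (f + 1) (m : Int) acc
          = codetoanomalyAltLoop f (PySem.Int.band (m : Int) ((m : Int) - 1))
              (acc ++ ["A" ++ PySem.Int.toStr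
                ((PySem.Int.bitLength (PySem.Int.band (m : Int) (-(m : Int))) : Int) - 1)]) by
        simp [codetoanomalyAltLoop, hm]]
      rw [band_neg_self m hm', band_pred m hm']
      have hcle : m &&& (m - 1) ≤ m - 1 := Nat.and_le_right
      have hdpos : 0 < m - (m &&& (m - 1)) := by omega
      have hblpos := bitLength_pos _ hdpos
      have hlab : ((PySem.Int.bitLength ((m - (m &&& (m - 1)) : Nat) : Int) : Int) - 1)
          = ((PySem.Int.bitLength ((m - (m &&& (m - 1)) : Nat) : Int) - 1 : Nat) : Int) := by
        omega
      rw [ih (m &&& (m - 1)) _ (by have : m &&& (m - 1) ≤ m := Nat.and_le_left; omega)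
        (by rw [hcons] at hlen; simp at hlen; omega)]
      rw [hcons]
      simp only [List.map_cons, natLab, hlab]
      simp

-- A's accumulation step is a comma-fold over the selected labels
lemma foldA (b : Int) : ∀ (L : List Int) (r : String),
    (∀ jj ∈ L, 0 ≤ jj ∧ jj < 16) →
    L.foldl (fun result i =>
      if PySem.Int.band (((1 <<< i.toNat : Nat) : Int)) b ≠ 0 then
        if result = "" then "A" ++ PySem.Int.toStr i
        else result ++ ",A" ++ PySem.Int.toStr i
      else result) r
    = List.foldl (fun s x => if s = "" then x else s ++ "," ++ x) r
        ((L.filter (fun jj => (PySem.Int.band b 65535).toNat.testBit jj.toNat)).map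
          (fun jj => "A" ++ PySem.Int.toStr jj)) := by
  intro L
  induction L with
  | nil => intro r _; rfl
  | cons j t ih =>
    intro r hmem
    have hj := hmem j (List.mem_cons_self)
    have hjt : j.toNat < 16 := by omega
    have hbit := band_two_pow_ne_zero_iff b j.toNat hjt
    have hrest : ∀ x ∈ t, 0 ≤ x ∧ x < 16 := fun x hx => hmem x (List.mem_cons_of_mem _ hx)
    by_cases hc : (PySem.Int.band b 65535).toNat.testBit j.toNat = true
    · have hband : PySem.Int.band (((1 <<< j.toNat : Nat) : Int)) b ≠ 0 := hbit.mpr hc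
      simp only [List.foldl_cons, List.filter_cons, hc, if_true, List.map_cons, ne_eq, hband,
        not_false_iff]
      rw [ih _ hrest]
      congr 1
      by_cases hr : r = ""
      · simp [hr]
      · rw [if_neg hr, if_neg hr, show (",A" : String) = "," ++ "A" from rfl,
          ← String.append_assoc, ← String.append_assoc]
    · have hband0 : PySem.Int.band (((1 <<< j.toNat : Nat) : Int)) b = 0 := by
        by_contra h; exact hc (hbit.mp h)
      rw [Bool.not_eq_true] at hc
      simp only [List.foldl_cons, List.filter_cons, hc, Bool.false_eq_true, if_false, hband0,
        ne_eq, not_true]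
      exact ih _ hrest

lemma ne_empty_of_toList {s : String} (h : s.toList ≠ []) : s ≠ "" := by
  intro he; subst he; exact h String.toList_empty

lemma append_ne_empty (s t : String) (h : s ≠ "") : s ++ t ≠ "" := by
  apply ne_empty_of_toList
  rw [String.toList_append]
  intro hc
  exact h (String.toList_inj.mp (by simp at hc ⊢; exact hc.1))

lemma natLab_ne_empty (j : Nat) : natLab j ≠ "" := by
  apply append_ne_empty
  decide

-- a comma-fold starting from a nonempty accumulator
lemma foldCat_eq (xs : List String) : ∀ r : String, r ≠ "" →
    List.foldl (fun s x => if s = "" then x else s ++ "," ++ x) r xs = r ++ joinPre xs := by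
  induction xs with
  | nil => intro r _; simp [joinPre]
  | cons y ys ih =>
    intro r hr
    simp only [List.foldl_cons, if_neg hr]
    rw [ih _ (append_ne_empty _ _ (append_ne_empty _ _ hr))]
    simp [joinPre, String.append_assoc]

lemma join_eq_joinPre (xs : List String) : ∀ x : String,
    PySem.Str.join "," (x :: xs) = x ++ joinPre xs := by
  induction xs with
  | nil =>
    intro x
    apply String.toList_inj.mp
    simp [PySem.Str.toList_join, PySem.Chars.join_singleton, joinPre]
  | cons y ys ih =>
    intro x
    apply String.toList_inj.mp
    have hih := congrArg String.toList (ih y)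
    simp only [PySem.Str.toList_join, String.toList_append, List.map_cons] at hih
    simp only [PySem.Str.toList_join, List.map_cons, joinPre, String.toList_append]
    rw [PySem.Chars.join_cons_cons, hih]
    simp [List.append_assoc]

-- the final emptiness branches of A and B agree on a common label list
lemma finalIf (L1 L2 : List String) (h : L1 = L2) (hne : ∀ x ∈ L2, x ≠ "") :
    (if List.foldl (fun s x => if s = "" then x else s ++ "," ++ x) "" L1 = "" then "-"
      else List.foldl (fun s x => if s = "" then x else s ++ "," ++ x) "" L1)
    = (if L2 = [] then "-" else PySem.Str.join "," L2) := by
  subst h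
  cases L1 with
  | nil => simp
  | cons x xs =>
    have hx : x ≠ "" := hne x List.mem_cons_self
    rw [List.foldl_cons, if_pos rfl, foldCat_eq xs x hx, join_eq_joinPre xs x]
    rw [if_neg (append_ne_empty _ _ hx), if_neg (by simp)]

-- ===== VERDICT (by name: the statement is the Claim_ definition above) =====
theorem codetoanomaly_spec : Claim_equal_codetoanomaly := by
  intro int_type _
  unfold Spec_codetoanomaly
  simp only [codetoanomaly, codetoanomaly_alt]
  set m : Nat := (PySem.Int.band int_type 65535).toNat with hm
  have hmask : PySem.Int.band int_type 65535 = (m : Int) :=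
    (Int.toNat_of_nonneg (band_mask_nonneg int_type)).symm
  have hmlt : m < 2 ^ 16 := band_mask_lt int_type
  -- B side
  rw [hmask, altLoop_eq 16 m [] hmlt (sb_length 16 m), List.nil_append]
  -- A side
  rw [foldA int_type _ _ (fun jj hj => by
    rw [PySem.List.mem_pyRange_one] at hj; exact hj)]
  apply finalIf
  · rw [PySem.List.pyRange_one, sb_filter]
    simp only [List.filter_map, List.map_map, zero_add, ← hm]
    have h1 : ((fun jj : Int => m.testBit jj.toNat) ∘ fun k : Nat => (k : Int))
        = fun k : Nat => m.testBit k := by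
      funext k; simp [Function.comp]
    have h2 : ((fun jj : Int => "A" ++ PySem.Int.toStr jj) ∘ fun k : Nat => (k : Int))
        = natLab := by
      funext k; simp [Function.comp, natLab]
    rw [h1, h2]
    norm_num
    rfl
  · intro x hx
    obtain ⟨j, _, hj⟩ := List.mem_map.mp hx
    rw [← hj]
    exact natLab_ne_empty j
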